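-- pv_equiv track=rewrite | github.com/macie-pixel/cs1301-lab3 | WebDevelopmentLab03 2/PhaseII.py | get_message_from_color
-- ===== SOURCE A (Python) =====
-- def get_message_from_color(color):
--     color_ranges = {
--         "Red": {"range": ["#ff0000", "#ff9999"], "message": "Red is often associated with passion and energy."},
--         "Green": {"range": ["#00ff00", "#99ff99"], "message": "Green symbolizes growth, harmony, and freshness."},
--         "Blue": {"range": ["#0000ff", "#9999ff"], "message": "Blue represents calmness, stability, and trust."},
--         "Yellow": {"range": ["#ffff00", "#ffff99"], "message": "Yellow is the color of sunshine, happiness, and optimism."},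
--         "Orange": {"range": ["#ffa500", "#ffcc99"], "message": "Orange represents creativity, enthusiasm, and determination."},
--         "Purple": {"range": ["#800080", "#cc99ff"], "message": "Purple is associated with royalty, ambition, and creativity."},
--         "Pink": {"range": ["#ff69b4", "#ffccff"], "message": "Pink symbolizes love, affection, and femininity."},
--         "Brown": {"range": ["#a52a2a", "#cc9966"], "message": "Brown represents stability, reliability, and earthiness."}
--     }
--     for color_name, color_data in color_ranges.items():
--         if color in color_data["range"]:
--             return color_data["message"]
--
--     return "This color represents luck and blessings entering your life."
-- ===== SOURCE B (Python) =====
-- def get_message_from_color(color):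
--     # Flat index: each hex code maps directly to its message; no loop, no range scan.
--     messages = {
--         "Red": "Red is often associated with passion and energy.",
--         "Green": "Green symbolizes growth, harmony, and freshness.",
--         "Blue": "Blue represents calmness, stability, and trust.",
--         "Yellow": "Yellow is the color of sunshine, happiness, and optimism.",
--         "Orange": "Orange represents creativity, enthusiasm, and determination.",
--         "Purple": "Purple is associated with royalty, ambition, and creativity.",
--         "Pink": "Pink symbolizes love, affection, and femininity.",
--         "Brown": "Brown represents stability, reliability, and earthiness.",
--     }
--     hexes = {
--         "#ff0000": "Red", "#ff9999": "Red",
--         "#00ff00": "Green", "#99ff99": "Green",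
--         "#0000ff": "Blue", "#9999ff": "Blue",
--         "#ffff00": "Yellow", "#ffff99": "Yellow",
--         "#ffa500": "Orange", "#ffcc99": "Orange",
--         "#800080": "Purple", "#cc99ff": "Purple",
--         "#ff69b4": "Pink", "#ffccff": "Pink",
--         "#a52a2a": "Brown", "#cc9966": "Brown",
--     }
--     name = hexes.get(color)
--     if name is None:
--         return "This color represents luck and blessings entering your life."
--     return messages[name]
-- ===== Notes on version B (the rewrite author's own statement) =====
-- stated objective: simpler
-- what changed: Replaces A's scan over nested {range, message} entries with an inner membership test by two pre-built flat dictionaries (hex code -> color name -> message), so the body is two direct lookups with no loop.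
import Mathlib
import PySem

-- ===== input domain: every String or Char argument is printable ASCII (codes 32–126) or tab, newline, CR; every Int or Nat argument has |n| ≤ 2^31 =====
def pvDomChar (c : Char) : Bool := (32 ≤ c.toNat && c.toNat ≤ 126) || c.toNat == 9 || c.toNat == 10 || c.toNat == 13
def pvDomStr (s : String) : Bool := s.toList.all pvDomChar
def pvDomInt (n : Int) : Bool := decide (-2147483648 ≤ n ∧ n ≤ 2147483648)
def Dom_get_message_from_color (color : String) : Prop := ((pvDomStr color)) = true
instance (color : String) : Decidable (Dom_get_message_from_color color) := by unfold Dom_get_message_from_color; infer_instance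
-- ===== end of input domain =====

-- B replaces A's scan over nested range lists by two direct dictionary lookups (hex → name → message); objective: simpler/idiomatic, no speed claim.

-- ===== PORT A =====
-- color_ranges.items(): each value dict {"range": …, "message": …} is ported as the pair (range, message)
def aColorRanges : List (String × (List String × String)) :=
  [ ("Red", (["#ff0000", "#ff9999"], "Red is often associated with passion and energy.")),
    ("Green", (["#00ff00", "#99ff99"], "Green symbolizes growth, harmony, and freshness.")),
    ("Blue", (["#0000ff", "#9999ff"], "Blue represents calmness, stability, and trust.")),
    ("Yellow", (["#ffff00", "#ffff99"], "Yellow is the color of sunshine, happiness, and optimism.")),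
    ("Orange", (["#ffa500", "#ffcc99"], "Orange represents creativity, enthusiasm, and determination.")),
    ("Purple", (["#800080", "#cc99ff"], "Purple is associated with royalty, ambition, and creativity.")),
    ("Pink", (["#ff69b4", "#ffccff"], "Pink symbolizes love, affection, and femininity.")),
    ("Brown", (["#a52a2a", "#cc9966"], "Brown represents stability, reliability, and earthiness.")) ]

-- the for-loop with early return over the items
def aLoop (color : String) : List (String × (List String × String)) → String
  | [] => "This color represents luck and blessings entering your life."
  | (_, (rng, msg)) :: rest => if color ∈ rng then msg else aLoop color rest

def get_message_from_color (color : String) : String :=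
  aLoop color aColorRanges

-- ===== PORT B =====
def bMessages : PySem.Dict String String := PySem.Dict.ofList
  [ ("Red", "Red is often associated with passion and energy."),
    ("Green", "Green symbolizes growth, harmony, and freshness."),
    ("Blue", "Blue represents calmness, stability, and trust."),
    ("Yellow", "Yellow is the color of sunshine, happiness, and optimism."),
    ("Orange", "Orange represents creativity, enthusiasm, and determination."),
    ("Purple", "Purple is associated with royalty, ambition, and creativity."),
    ("Pink", "Pink symbolizes love, affection, and femininity."),
    ("Brown", "Brown represents stability, reliability, and earthiness.") ]

def bHexes : PySem.Dict String String := PySem.Dict.ofList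
  [ ("#ff0000", "Red"), ("#ff9999", "Red"),
    ("#00ff00", "Green"), ("#99ff99", "Green"),
    ("#0000ff", "Blue"), ("#9999ff", "Blue"),
    ("#ffff00", "Yellow"), ("#ffff99", "Yellow"),
    ("#ffa500", "Orange"), ("#ffcc99", "Orange"),
    ("#800080", "Purple"), ("#cc99ff", "Purple"),
    ("#ff69b4", "Pink"), ("#ffccff", "Pink"),
    ("#a52a2a", "Brown"), ("#cc9966", "Brown") ]

def get_message_from_color_alt (color : String) : String :=
  match PySem.Dict.get? bHexes color with
  | none => "This color represents luck and blessings entering your life."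
  | some name =>
    -- messages[name]: the key is always present (every value of bHexes is a key of bMessages), so KeyError is impossible
    (PySem.Dict.get? bMessages name).getD ""

-- ===== PRECONDITION & SPEC =====
def Spec_get_message_from_color (color : String) (out : String) : Prop := out = get_message_from_color_alt color
instance (color : String) (out : String) : Decidable (Spec_get_message_from_color color out) := by unfold Spec_get_message_from_color; infer_instance

-- ===== CLAIM (what is proved, stated in full; the proofs are below) =====
def Claim_equal_get_message_from_color : Prop := ∀ (color : String), Dom_get_message_from_color color → Spec_get_message_from_color color (get_message_from_color color)

-- ===== LEMMAS AND PROOFS =====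
theorem gmfc_agree (color : String) :
    get_message_from_color color = get_message_from_color_alt color := by
  by_cases h0 : color = "#ff0000"
  · subst h0; decide
  by_cases h1 : color = "#ff9999"
  · subst h1; decide
  by_cases h2 : color = "#00ff00"
  · subst h2; decide
  by_cases h3 : color = "#99ff99"
  · subst h3; decide
  by_cases h4 : color = "#0000ff"
  · subst h4; decide
  by_cases h5 : color = "#9999ff"
  · subst h5; decide
  by_cases h6 : color = "#ffff00"
  · subst h6; decide
  by_cases h7 : color = "#ffff99"
  · subst h7; decide
  by_cases h8 : color = "#ffa500"
  · subst h8; decide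
  by_cases h9 : color = "#ffcc99"
  · subst h9; decide
  by_cases h10 : color = "#800080"
  · subst h10; decide
  by_cases h11 : color = "#cc99ff"
  · subst h11; decide
  by_cases h12 : color = "#ff69b4"
  · subst h12; decide
  by_cases h13 : color = "#ffccff"
  · subst h13; decide
  by_cases h14 : color = "#a52a2a"
  · subst h14; decide
  by_cases h15 : color = "#cc9966"
  · subst h15; decide
  have hb : bHexes = PySem.Dict.mk [("#ff0000", "Red"), ("#ff9999", "Red"), ("#00ff00", "Green"), ("#99ff99", "Green"), ("#0000ff", "Blue"), ("#9999ff", "Blue"), ("#ffff00", "Yellow"), ("#ffff99", "Yellow"), ("#ffa500", "Orange"), ("#ffcc99", "Orange"), ("#800080", "Purple"), ("#cc99ff", "Purple"), ("#ff69b4", "Pink"), ("#ffccff", "Pink"), ("#a52a2a", "Brown"), ("#cc9966", "Brown")] := by decide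
  simp only [get_message_from_color, get_message_from_color_alt, aLoop, aColorRanges, hb]
  simp [PySem.Dict.get?, h0, h1, h2, h3, h4, h5, h6, h7, h8, h9, h10, h11, h12, h13, h14, h15, Ne.symm h0, Ne.symm h1, Ne.symm h2, Ne.symm h3, Ne.symm h4, Ne.symm h5, Ne.symm h6, Ne.symm h7, Ne.symm h8, Ne.symm h9, Ne.symm h10, Ne.symm h11, Ne.symm h12, Ne.symm h13, Ne.symm h14, Ne.symm h15]

-- ===== VERDICT (by name: the statement is the Claim_ definition above) =====
theorem get_message_from_color_spec : Claim_equal_get_message_from_color := by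
  intro color _
  unfold Spec_get_message_from_color
  exact gmfc_agree color
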